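-- pv_equiv track=rewrite | github.com/iandioch/solutions | kattis/geneticsearch/solution.py | op
-- ===== SOURCE A (Python) =====
-- def count_with_overlaps(s, seek):
--     i = 0
--     ans = 0
--     while True:
--         i = s.find(seek, i) + 1
--         if i > 0:
--             ans += 1
--         else:
--             return ans
--
-- def op(a, b):
--     i = count_with_overlaps(b, a)
--
--     j = 0
--     deleted = set()
--     for p in range(len(a)):
--         c = a[:p] + a[p+1:]
--         if c in deleted:
--             continue
--         deleted.add(c)
--         j += count_with_overlaps(b, c)
--
--     k = 0
--     added = set()
--     for p in range(len(a) + 1):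
--         for c in 'AGCT':
--             s = a[:p] + c + a[p:]
--             added.add(s)
--     for s in added:
--         k += count_with_overlaps(b, s)
--
--     return i, j, k
-- ===== SOURCE B (Python) =====
-- def op(a, b):
--     n = len(a)
--
--     def substr_counts(length):
--         # one pass over b: how often each substring of this length occurs
--         d = {}
--         for s in range(len(b) - length + 1):
--             t = b[s:s + length]
--             d[t] = d.get(t, 0) + 1
--         return d
--
--     i = substr_counts(n).get(a, 0)
--
--     dels = {a[:p] + a[p + 1:] for p in range(n)}
--     dn = substr_counts(n - 1)
--     j = sum(dn.get(c, 0) for c in dels)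
--
--     ins = {a[:p] + c + a[p:] for p in range(n + 1) for c in 'AGCT'}
--     dp = substr_counts(n + 1)
--     k = sum(dp.get(s, 0) for s in ins)
--
--     return i, j, k
-- ===== Notes on version B (the rewrite author's own statement) =====
-- stated objective: alternative
-- what changed: Instead of running an overlapping str.find scan of b for every candidate string (a itself, each distinct deletion, each distinct insertion), B makes one pass over b per relevant length (len(a)-1, len(a), len(a)+1) building a dict counting every substring of that length, then answers each distinct candidate by a single dict lookup.
import Mathlib
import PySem

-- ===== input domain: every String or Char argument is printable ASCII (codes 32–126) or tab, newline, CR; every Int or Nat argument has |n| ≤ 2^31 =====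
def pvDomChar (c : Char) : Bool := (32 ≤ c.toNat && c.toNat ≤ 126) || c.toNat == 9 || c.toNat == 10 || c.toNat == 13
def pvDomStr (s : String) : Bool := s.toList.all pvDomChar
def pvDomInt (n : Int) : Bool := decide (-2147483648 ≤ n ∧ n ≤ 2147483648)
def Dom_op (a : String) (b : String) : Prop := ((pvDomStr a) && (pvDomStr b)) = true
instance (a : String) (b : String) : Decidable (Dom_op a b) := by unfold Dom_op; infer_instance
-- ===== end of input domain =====

-- B replaces A's per-candidate str.find scans of b by three one-pass substring counters over b
-- (one dict per relevant length), looked up once per distinct candidate (objective: alternative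
-- algorithm of similar measured cost).

-- ===== PORT A =====
-- count_with_overlaps: the 'while True' find-loop; the fuel (length+2) only makes the loop
-- total in Lean — it is provably never exhausted (each successful find strictly increases i).
def cwoGo (s seek : List Char) : Nat → Int → Int → Int
  | 0, _, ans => ans
  | fuel+1, i, ans =>
    let i' := PySem.Chars.findFrom s seek i none + 1
    if 0 < i' then cwoGo s seek fuel i' (ans + 1) else ans

def cwo (s seek : List Char) : Int := cwoGo s seek (s.length + 2) 0 0

def op (a b : String) : List Int :=
  let al := a.toList
  let bl := b.toList
  let i := cwo bl al
  let st := (PySem.List.pyRange 0 (al.length : Int) 1).foldl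
    (fun (st : PySem.Set (List Char) × Int) p =>
      let c := PySem.List.slice al none (some p) ++ PySem.List.slice al (some (p + 1)) none
      if PySem.Set.contains st.1 c then st
      else (PySem.Set.add st.1 c, st.2 + cwo bl c))
    ((PySem.Set.empty : PySem.Set (List Char)), (0 : Int))
  let j := st.2
  let added := (PySem.List.pyRange 0 ((al.length : Int) + 1) 1).foldl
    (fun (acc : PySem.Set (List Char)) p =>
      ("AGCT".toList).foldl
        (fun acc2 ch => PySem.Set.add acc2
          (PySem.List.slice al none (some p) ++ [ch] ++ PySem.List.slice al (some p) none))
        acc)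
    (PySem.Set.empty : PySem.Set (List Char))
  let k := added.foldl (fun acc s => acc + cwo bl s) 0
  [i, j, k]

-- ===== PORT B =====
-- one pass over b: how often each substring of the given length occurs (d[t] = d.get(t,0)+1)
def counter (bl : List Char) (L : Int) : PySem.Dict (List Char) Int :=
  (PySem.List.pyRange 0 ((bl.length : Int) - L + 1) 1).foldl
    (fun d s => PySem.Dict.modify d (PySem.List.slice bl (some s) (some (s + L))) 0 (· + 1))
    PySem.Dict.empty

def op_alt (a b : String) : List Int :=
  let al := a.toList
  let bl := b.toList
  let n : Int := al.length
  let i := PySem.Dict.getD (counter bl n) al 0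
  let dels := PySem.Set.ofList ((PySem.List.pyRange 0 n 1).map
    (fun p => PySem.List.slice al none (some p) ++ PySem.List.slice al (some (p + 1)) none))
  let dn := counter bl (n - 1)
  let j := (dels.map (fun c => PySem.Dict.getD dn c 0)).sum
  let ins := PySem.Set.ofList ((PySem.List.pyRange 0 (n + 1) 1).flatMap
    (fun p => ("AGCT".toList).map
      (fun ch => PySem.List.slice al none (some p) ++ [ch] ++ PySem.List.slice al (some p) none)))
  let dp := counter bl (n + 1)
  let k := (ins.map (fun s => PySem.Dict.getD dp s 0)).sum
  [i, j, k]

-- ===== PRECONDITION & SPEC =====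
def Spec_op (a : String) (b : String) (out : List Int) : Prop := out = op_alt a b
instance (a : String) (b : String) (out : List Int) : Decidable (Spec_op a b out) := by unfold Spec_op; infer_instance

-- ===== CLAIM (what is proved, stated in full; the proofs are below) =====
def Claim_equal_op : Prop := ∀ (a : String) (b : String), Dom_op a b → Spec_op a b (op a b)

-- ===== LEMMAS AND PROOFS =====

-- number of match positions j ≥ i of `c` in `s` (positions 0..s.length, as str.find sees them)
def mcnt (s c : List Char) (i : Nat) : Nat :=
  ((Finset.range (s.length + 1)).filter (fun j => i ≤ j ∧ c <+: s.drop j)).card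

lemma mcnt_zero (s c : List Char) (i : Nat)
    (h : ∀ j, i ≤ j → j ≤ s.length → ¬ c <+: s.drop j) : mcnt s c i = 0 := by
  unfold mcnt
  rw [Finset.card_eq_zero, Finset.filter_eq_empty_iff]
  intro j hj
  simp only [Finset.mem_range] at hj
  rintro ⟨hij, hp⟩
  exact h j hij (by omega) hp

lemma mcnt_step (s c : List Char) (i r : Nat) (hir : i ≤ r) (hr : r ≤ s.length)
    (hp : c <+: s.drop r) (hmin : ∀ j, i ≤ j → j < r → ¬ c <+: s.drop j) :
    mcnt s c i = mcnt s c (r + 1) + 1 := by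
  unfold mcnt
  have hset : (Finset.range (s.length + 1)).filter (fun j => i ≤ j ∧ c <+: s.drop j)
      = insert r ((Finset.range (s.length + 1)).filter (fun j => r + 1 ≤ j ∧ c <+: s.drop j)) := by
    ext j
    simp only [Finset.mem_filter, Finset.mem_insert, Finset.mem_range]
    constructor
    · rintro ⟨hj, hij, hpj⟩
      by_cases hjr : j = r
      · exact Or.inl hjr
      · rcases Nat.lt_or_ge j r with hlt | hge
        · exact absurd hpj (hmin j hij hlt)
        · exact Or.inr ⟨hj, by omega, hpj⟩
    · rintro (rfl | ⟨hj, hrj, hpj⟩)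
      · exact ⟨by omega, hir, hp⟩
      · exact ⟨hj, by omega, hpj⟩
  rw [hset, Finset.card_insert_of_notMem]
  simp only [Finset.mem_filter, Finset.mem_range, not_and]
  intro _ h'
  omega

lemma findFrom_top (s c : List Char) :
    PySem.Chars.findFrom s c ((s.length : Int) + 1) none = -1 := by
  simp [PySem.Chars.findFrom, show ¬ ((s.length:Int) + 1 < 0) by omega,
        show (s.length:Int) < s.length + 1 by omega]

lemma prefix_drop_infix (s c : List Char) (i j : Nat) (hij : i ≤ j)
    (hp : c <+: s.drop j) : c <:+: s.drop i := by
  have : s.drop j = (s.drop i).drop (j - i) := by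
    rw [List.drop_drop]; congr 1; omega
  rw [this] at hp
  exact hp.isInfix.trans (List.drop_suffix _ _).isInfix

lemma cwoGo_eq (s c : List Char) (fuel : Nat) : ∀ (i : Nat) (ans : Int),
    i ≤ s.length + 1 → s.length + 2 ≤ fuel + i →
    cwoGo s c fuel (i : Int) ans = ans + (mcnt s c i : Int) := by
  induction fuel with
  | zero => intro i ans hi hf; omega
  | succ fuel ih =>
    intro i ans hi hf
    rcases Nat.eq_or_lt_of_le hi with heq | hlt
    · -- i = s.length + 1 : find past the end returns -1
      have hcast : ((i : Nat) : Int) = (s.length : Int) + 1 := by rw [heq]; push_cast; ring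
      have hz : mcnt s c i = 0 := mcnt_zero s c i (fun j h1 h2 => by omega)
      simp only [cwoGo, hcast, findFrom_top, hz]
      norm_num
    · have hle : i ≤ s.length := by omega
      have hff := PySem.Chars.findFrom_natCast s c i hle
      by_cases hneg : PySem.Chars.find (List.drop i s) c = -1
      · rw [hneg] at hff; simp at hff
        have hz : mcnt s c i = 0 := by
          apply mcnt_zero
          intro j h1 h2 hp
          rw [PySem.Chars.find_eq_neg_one_iff] at hneg
          exact hneg (prefix_drop_infix s c i j h1 hp)
        simp only [cwoGo, hff, hz]
        norm_num
      · have hpos : 0 ≤ PySem.Chars.find (List.drop i s) c := by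
          have := PySem.Chars.neg_one_le_find (List.drop i s) c
          omega
        set f := PySem.Chars.find (List.drop i s) c with hfdef
        have hflen : f ≤ ((List.drop i s).length : Int) := PySem.Chars.find_le_length _ _
        have hspec := PySem.Chars.find_spec (s := List.drop i s) (sub := c) hpos
        rw [if_neg hneg] at hff
        have hr : PySem.Chars.findFrom s c (i : Int) none = ((i + f.toNat : Nat) : Int) := by
          rw [hff]; push_cast; omega
        have hrlen : i + f.toNat ≤ s.length := by
          simp [List.length_drop] at hflen; omega
        simp only [cwoGo, hr]
        rw [if_pos (by push_cast; omega)]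
        have : ((i + f.toNat : Nat) : Int) + 1 = ((i + f.toNat + 1 : Nat) : Int) := by push_cast; ring
        rw [this, ih (i + f.toNat + 1) (ans + 1) (by omega) (by omega)]
        have hpre : c <+: s.drop (i + f.toNat) := by
          have h := hspec.1
          rw [List.drop_drop] at h
          exact h
        have hmin : ∀ j, i ≤ j → j < i + f.toNat → ¬ c <+: s.drop j := by
          intro j h1 h2 hp
          have := hspec.2 (j - i) (by omega)
          rw [List.drop_drop] at this
          apply this
          have e : i + (j - i) = j := by omega
          rw [e]; exact hp
        rw [mcnt_step s c i (i + f.toNat) (by omega) hrlen hpre hmin]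
        push_cast; ring

lemma cwo_eq (s c : List Char) : cwo s c = (mcnt s c 0 : Int) := by
  have := cwoGo_eq s c (s.length + 2) 0 0 (by omega) (by omega)
  simpa [cwo] using this

lemma countP_range_card (p : Nat → Bool) (m : Nat) :
    (List.range m).countP p = ((Finset.range m).filter (fun j => p j)).card := by
  simp [Finset.card, Finset.filter, Finset.range, Multiset.range, List.countP_eq_length_filter]

lemma mcnt_eq_countP (s c : List Char) :
    mcnt s c 0 = (List.range (s.length + 1)).countP (fun j => decide (c <+: s.drop j)) := by
  unfold mcnt
  rw [countP_range_card]
  congr 1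
  ext j
  simp

lemma counter_getD (bl c : List Char) :
    PySem.Dict.getD (counter bl (c.length : Int)) c 0 = (mcnt bl c 0 : Int) := by
  unfold counter
  rw [← List.foldl_map
      (f := fun s0 => PySem.List.slice bl (some s0) (some (s0 + (c.length : Int))))
      (g := fun d t => PySem.Dict.modify d t 0 (· + 1))]
  rw [PySem.Dict.getD_foldl_modify_add_one]
  have hempty : PySem.Dict.getD (PySem.Dict.empty) c (0:Int) = 0 := rfl
  rw [hempty, zero_add]
  rw [mcnt_eq_countP]
  by_cases hlen : c.length ≤ bl.length
  · have hm : (bl.length : Int) - (c.length : Int) + 1 = ((bl.length - c.length + 1 : Nat) : Int) := by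
      push_cast; omega
    rw [hm, PySem.List.pyRange_zero_natCast, List.map_map, List.count_eq_countP, List.countP_map]
    set m := bl.length - c.length + 1 with hmdef
    have hsplit : bl.length + 1 = m + c.length := by omega
    have hz : List.countP ((fun j => decide (c <+: bl.drop j)) ∘ (fun x => m + x))
        (List.range c.length) = 0 := by
      rw [List.countP_eq_zero]
      intro t ht
      simp only [Function.comp, decide_eq_true_eq]
      intro hp
      have h1 := hp.length_le
      simp only [List.length_drop] at h1
      simp only [List.mem_range] at ht
      omega
    have hR : (List.range (bl.length + 1)).countP (fun j => decide (c <+: bl.drop j))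
        = (List.range m).countP (fun j => decide (c <+: bl.drop j)) := by
      rw [hsplit, List.range_add, List.countP_append, List.countP_map, hz, Nat.add_zero]
    rw [hR]
    congr 1
    apply List.countP_congr
    intro j hj
    simp only [List.mem_range] at hj
    simp only [Function.comp]
    have hslice : PySem.List.slice bl (some ((j:Nat) : Int)) (some (((j:Nat):Int) + ((c.length:Nat) : Int)))
        = (bl.drop j).take c.length := PySem.List.slice_natCast_add bl j c.length
    rw [hslice]
    simp only [beq_iff_eq, decide_eq_true_eq, List.prefix_iff_eq_take]
    exact eq_comm
  · -- candidate longer than b: the range is empty and no position matches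
    have hnil : PySem.List.pyRange 0 ((bl.length : Int) - (c.length : Int) + 1) 1 = [] := by
      rw [List.eq_nil_iff_forall_not_mem]
      intro x hx
      rw [PySem.List.mem_pyRange_one] at hx
      omega
    rw [hnil]
    have hz : (List.range (bl.length + 1)).countP (fun j => decide (c <+: bl.drop j)) = 0 := by
      rw [List.countP_eq_zero]
      intro j hj
      simp only [decide_eq_true_eq]
      intro hp
      have h1 := hp.length_le
      simp only [List.length_drop] at h1
      simp only [List.mem_range] at hj
      omega
    simp [hz]

lemma cwo_eq_counter (bl c : List Char) :
    cwo bl c = PySem.Dict.getD (counter bl (c.length : Int)) c 0 := by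
  rw [cwo_eq, counter_getD]

lemma set_prefix_update (l : List (List Char)) : ∀ (s : PySem.Set (List Char)),
    s <+: PySem.Set.update s l := by
  induction l with
  | nil => intro s; exact List.prefix_refl s
  | cons x t ih =>
    intro s
    have h1 : s <+: PySem.Set.add s x := by
      unfold PySem.Set.add
      split
      · exact List.prefix_refl s
      · exact List.prefix_append s [x]
    exact h1.trans (ih (PySem.Set.add s x))

lemma foldl_dedup_sum (f : List Char → Int) (l : List (List Char)) :
    ∀ (s : PySem.Set (List Char)) (acc : Int),
    l.foldl (fun (st : PySem.Set (List Char) × Int) c =>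
        if PySem.Set.contains st.1 c then st
        else (PySem.Set.add st.1 c, st.2 + f c)) (s, acc)
      = (PySem.Set.update s l,
         acc + (((PySem.Set.update s l).drop s.length).map f).sum) := by
  induction l with
  | nil =>
    intro s acc
    simp [PySem.Set.update]
  | cons x t ih =>
    intro s acc
    simp only [List.foldl_cons]
    by_cases hc : PySem.Set.contains s x
    · rw [if_pos hc]
      have hadd : PySem.Set.add s x = s := by unfold PySem.Set.add; rw [if_pos hc]
      have hupd : PySem.Set.update s (x :: t) = PySem.Set.update s t := by
        unfold PySem.Set.update
        simp only [List.foldl_cons, hadd]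
      rw [ih s acc, hupd]
    · rw [if_neg hc]
      have hadd : PySem.Set.add s x = s ++ [x] := by
        unfold PySem.Set.add
        rw [if_neg hc]
      have hupd : PySem.Set.update s (x :: t) = PySem.Set.update (s ++ [x]) t := by
        unfold PySem.Set.update
        simp only [List.foldl_cons, hadd]
      rw [hadd, ih (s ++ [x]) (acc + f x), hupd]
      obtain ⟨u, hu⟩ := set_prefix_update t (s ++ [x])
      rw [← hu]
      have h1 : (s ++ [x] ++ u).drop s.length = x :: u := by
        rw [List.append_assoc, List.drop_left]
        rfl
      have h2 : (s ++ [x] ++ u).drop ((s ++ [x]).length) = u := List.drop_left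
      rw [h1, h2]
      simp only [List.map_cons, List.sum_cons]
      ring_nf

lemma foldl_set_flatMap (h : Int → List (List Char)) (l : List Int) :
    ∀ (s : PySem.Set (List Char)),
    l.foldl (fun acc p => (h p).foldl PySem.Set.add acc) s
      = (l.flatMap h).foldl PySem.Set.add s := by
  induction l with
  | nil => intro s; rfl
  | cons x t ih =>
    intro s
    simp only [List.foldl_cons, List.flatMap_cons, List.foldl_append]
    exact ih _

-- A's j-loop (skip-if-seen, else add and count) sums f over the distinct candidates
lemma dedup_pair_snd (g : Int → List Char) (l : List Int) (f : List Char → Int) :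
    (l.foldl (fun (st : PySem.Set (List Char) × Int) p =>
        if PySem.Set.contains st.1 (g p) then st
        else (PySem.Set.add st.1 (g p), st.2 + f (g p)))
      ((PySem.Set.empty : PySem.Set (List Char)), (0 : Int))).2
    = ((PySem.Set.ofList (l.map g)).map f).sum := by
  have h : (l.foldl (fun (st : PySem.Set (List Char) × Int) p =>
        if PySem.Set.contains st.1 (g p) then st
        else (PySem.Set.add st.1 (g p), st.2 + f (g p)))
      ((PySem.Set.empty : PySem.Set (List Char)), (0 : Int)))
      = ((l.map g).foldl (fun (st : PySem.Set (List Char) × Int) c =>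
          if PySem.Set.contains st.1 c then st
          else (PySem.Set.add st.1 c, st.2 + f c))
        ((PySem.Set.empty : PySem.Set (List Char)), (0 : Int))) :=
    (List.foldl_map (f := g)
      (g := fun (st : PySem.Set (List Char) × Int) c =>
        if PySem.Set.contains st.1 c then st
        else (PySem.Set.add st.1 c, st.2 + f c))).symm
  rw [h, foldl_dedup_sum]
  simp [PySem.Set.ofList_eq_foldl, PySem.Set.update, PySem.Set.empty]

-- A's k-loops (build the set by nested adds, then sum f over it)
lemma add_fold_sum (g : Int → Char → List Char) (l : List Int) (cs : List Char)
    (f : List Char → Int) :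
    ((l.foldl (fun (acc : PySem.Set (List Char)) p =>
        cs.foldl (fun acc2 ch => PySem.Set.add acc2 (g p ch)) acc)
      (PySem.Set.empty : PySem.Set (List Char))).foldl (fun acc s => acc + f s) 0)
    = ((PySem.Set.ofList (l.flatMap (fun p => cs.map (g p)))).map f).sum := by
  have h1 : ∀ (acc : PySem.Set (List Char)) p,
      cs.foldl (fun acc2 ch => PySem.Set.add acc2 (g p ch)) acc
        = (cs.map (g p)).foldl PySem.Set.add acc := fun acc p =>
    (List.foldl_map (f := g p) (g := PySem.Set.add)).symm
  have h2 : (l.foldl (fun (acc : PySem.Set (List Char)) p =>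
        cs.foldl (fun acc2 ch => PySem.Set.add acc2 (g p ch)) acc)
      (PySem.Set.empty : PySem.Set (List Char)))
      = PySem.Set.ofList (l.flatMap (fun p => cs.map (g p))) := by
    simp only [h1]
    rw [PySem.Set.ofList_eq_foldl, ← foldl_set_flatMap]
    rfl
  rw [h2, PySem.List.foldl_add]
  simp

theorem op_eq_alt (a b : String) : op a b = op_alt a b := by
  simp only [op, op_alt]
  set al := a.toList with hal
  set bl := b.toList with hbl
  -- first component
  have hi : cwo bl al = PySem.Dict.getD (counter bl (al.length : Int)) al 0 :=
    cwo_eq_counter bl al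
  -- second component
  have hj1 := dedup_pair_snd
    (fun p => PySem.List.slice al none (some p) ++ PySem.List.slice al (some (p + 1)) none)
    (PySem.List.pyRange 0 (al.length : Int) 1) (cwo bl)
  have hjc : ∀ c ∈ PySem.Set.ofList ((PySem.List.pyRange 0 (al.length : Int) 1).map
      (fun p => PySem.List.slice al none (some p) ++ PySem.List.slice al (some (p + 1)) none)),
      cwo bl c = PySem.Dict.getD (counter bl ((al.length : Int) - 1)) c 0 := by
    intro c hcmem
    rw [PySem.Set.mem_ofList] at hcmem
    simp only [List.mem_map] at hcmem
    obtain ⟨p, hp, rfl⟩ := hcmem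
    rw [PySem.List.mem_pyRange_one] at hp
    have hlen : (((PySem.List.slice al none (some p)
        ++ PySem.List.slice al (some (p + 1)) none)).length : Int) = (al.length : Int) - 1 := by
      rw [PySem.List.slice_to al hp.1, PySem.List.slice_from al (by omega : (0:Int) ≤ p + 1),
          List.length_append, List.length_take, List.length_drop]
      omega
    rw [← hlen, ← cwo_eq_counter]
  -- third component
  have hk1 := add_fold_sum
    (fun p ch => PySem.List.slice al none (some p) ++ [ch] ++ PySem.List.slice al (some p) none)
    (PySem.List.pyRange 0 ((al.length : Int) + 1) 1) ("AGCT".toList) (cwo bl)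
  have hkc : ∀ c ∈ PySem.Set.ofList ((PySem.List.pyRange 0 ((al.length : Int) + 1) 1).flatMap
      (fun p => ("AGCT".toList).map
        (fun ch => PySem.List.slice al none (some p) ++ [ch] ++ PySem.List.slice al (some p) none))),
      cwo bl c = PySem.Dict.getD (counter bl ((al.length : Int) + 1)) c 0 := by
    intro c hcmem
    rw [PySem.Set.mem_ofList] at hcmem
    simp only [List.mem_flatMap, List.mem_map] at hcmem
    obtain ⟨p, hp, ch, _, rfl⟩ := hcmem
    rw [PySem.List.mem_pyRange_one] at hp
    have hlen : (((PySem.List.slice al none (some p) ++ [ch]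
        ++ PySem.List.slice al (some p) none)).length : Int) = (al.length : Int) + 1 := by
      rw [PySem.List.slice_to al hp.1, PySem.List.slice_from al hp.1,
          List.length_append, List.length_append, List.length_take, List.length_drop]
      simp only [List.length_cons, List.length_nil]
      omega
    rw [← hlen, ← cwo_eq_counter]
  rw [hi]
  simp only [hj1, hk1]
  rw [List.map_congr_left hjc, List.map_congr_left hkc]

-- ===== VERDICT (by name: the statement is the Claim_ definition above) =====
theorem op_spec : Claim_equal_op := by
  intro a b _
  unfold Spec_op
  exact op_eq_alt a b
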